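-- pv_equiv track=rewrite | github.com/YAstesia/Vehiclism | car_brand_sales.py | generate_months
-- ===== SOURCE A (Python) =====
-- def generate_months(start_year, start_month, end_year, end_month):
--     months = []
--     current_year = start_year
--     current_month = start_month
--     while (current_year < end_year) or (current_year == end_year and current_month <= end_month):
--         months.append(f"{current_year:04d}{current_month:02d}")
--         current_month += 1
--         if current_month > 12:
--             current_month = 1
--             current_year += 1
--     return months
-- ===== SOURCE B (Python) =====
-- def generate_months(start_year, start_month, end_year, end_month):
--     return [
--         f"{y:04d}{m:02d}"
--         for y in range(start_year, end_year + 1)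
--         for m in range(start_month if y == start_year else 1,
--                        (min(end_month, 12) if y == end_year else 12) + 1)
--     ]
-- ===== Notes on version B (the rewrite author's own statement) =====
-- stated objective: simpler
-- what changed: Replaces the stateful while-loop with month-carry branch by a single per-year comprehension whose month range is computed directly for the first, middle and last year.
-- intended difference: When start_month > 12 and the range is nonempty, A emits one malformed first token such as '202013' before carrying into January; B emits no month beyond 12, returning only the real months, which is the intended output. — e.g. on generate_months(2020, 13, 2020, 13): A returns ["202013"], B returns []
import Mathlib
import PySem

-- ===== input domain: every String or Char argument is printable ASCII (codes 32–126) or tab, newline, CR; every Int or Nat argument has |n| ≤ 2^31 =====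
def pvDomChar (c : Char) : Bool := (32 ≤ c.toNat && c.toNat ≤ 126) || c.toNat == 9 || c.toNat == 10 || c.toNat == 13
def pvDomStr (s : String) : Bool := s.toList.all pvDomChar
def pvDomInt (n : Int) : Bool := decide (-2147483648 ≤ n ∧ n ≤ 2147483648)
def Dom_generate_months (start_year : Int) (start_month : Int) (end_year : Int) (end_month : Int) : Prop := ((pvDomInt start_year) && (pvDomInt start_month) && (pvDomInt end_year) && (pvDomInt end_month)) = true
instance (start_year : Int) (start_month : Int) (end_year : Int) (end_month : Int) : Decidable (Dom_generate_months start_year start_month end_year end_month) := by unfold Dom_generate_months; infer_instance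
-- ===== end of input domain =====

-- B replaces A's stateful while-loop (with month-carry branch) by one per-year comprehension; same cost, simpler shape.


-- shared helper: str(n).zfill(w) — exact hand port of f"{n:0wd}" (Python puts the zero padding between sign and digits)
def pvZfill (w : Nat) (cs : List Char) : List Char :=
  match cs with
  | '-' :: rest => '-' :: (List.replicate (w - cs.length) '0' ++ rest)
  | _ => List.replicate (w - cs.length) '0' ++ cs

-- hand port of f"{y:04d}{m:02d}", used by both Pythons
def pvFmtYM (y m : Int) : String :=
  String.ofList (pvZfill 4 (PySem.Int.toChars y) ++ pvZfill 2 (PySem.Int.toChars m))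

-- ===== PORT A =====
-- the while-loop, with its accumulator and both branches, as structural recursion
def pvLoopA (end_year end_month : Int) (current_year current_month : Int) (months : List String) : List String :=
  if current_year < end_year ∨ (current_year = end_year ∧ current_month ≤ end_month) then
    if current_month + 1 > 12 then
      pvLoopA end_year end_month (current_year + 1) 1 (months ++ [pvFmtYM current_year current_month])
    else
      pvLoopA end_year end_month current_year (current_month + 1) (months ++ [pvFmtYM current_year current_month])
  else months
termination_by ((end_year - current_year + 1).toNat, (13 - current_month).toNat)
decreasing_by
· exact Prod.Lex.left _ _ (by omega)
· exact Prod.Lex.right _ (by omega)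

def generate_months (start_year : Int) (start_month : Int) (end_year : Int) (end_month : Int) : List String :=
  pvLoopA end_year end_month start_year start_month []

-- ===== PORT B =====
-- the comprehension: flatMap over the year range, map over each year's month range
def generate_months_alt (start_year : Int) (start_month : Int) (end_year : Int) (end_month : Int) : List String :=
  (PySem.List.pyRange start_year (end_year + 1) 1).flatMap (fun y =>
    (PySem.List.pyRange (if y = start_year then start_month else 1)
        ((if y = end_year then min end_month 12 else 12) + 1) 1).map (fun m => pvFmtYM y m))

-- ===== PRECONDITION & SPEC =====
-- When start_month > 12 and the range is nonempty, A emits one malformed first token such as "202013"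
-- before carrying into January; B emits no month beyond 12, returning only the real months, which is the intended output.
def D_generate_months (start_year : Int) (start_month : Int) (end_year : Int) (end_month : Int) : Prop :=
  12 < start_month ∧ (start_year < end_year ∨ (start_year = end_year ∧ start_month ≤ end_month))
instance (start_year : Int) (start_month : Int) (end_year : Int) (end_month : Int) : Decidable (D_generate_months start_year start_month end_year end_month) := by unfold D_generate_months; infer_instance

def Spec_generate_months (start_year : Int) (start_month : Int) (end_year : Int) (end_month : Int) (out : List String) : Prop := ¬ D_generate_months start_year start_month end_year end_month → out = generate_months_alt start_year start_month end_year end_month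
instance (start_year : Int) (start_month : Int) (end_year : Int) (end_month : Int) (out : List String) : Decidable (Spec_generate_months start_year start_month end_year end_month out) := by unfold Spec_generate_months; infer_instance

def pvDiffWitness_generate_months : Int × Int × Int × Int := (2020, 13, 2020, 13)
def pvDiffWitnessOut_generate_months : (List String) × (List String) := (["202013"], [])

-- ===== CLAIM (what is proved, stated in full; the proofs are below) =====
def Claim_unchanged_generate_months : Prop := ∀ (start_year : Int) (start_month : Int) (end_year : Int) (end_month : Int), Dom_generate_months start_year start_month end_year end_month → Spec_generate_months start_year start_month end_year end_month (generate_months start_year start_month end_year end_month)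
def Claim_changed_generate_months : Prop := Dom_generate_months (pvDiffWitness_generate_months.1) (pvDiffWitness_generate_months.2.1) (pvDiffWitness_generate_months.2.2.1) (pvDiffWitness_generate_months.2.2.2) ∧ D_generate_months (pvDiffWitness_generate_months.1) (pvDiffWitness_generate_months.2.1) (pvDiffWitness_generate_months.2.2.1) (pvDiffWitness_generate_months.2.2.2) ∧ generate_months (pvDiffWitness_generate_months.1) (pvDiffWitness_generate_months.2.1) (pvDiffWitness_generate_months.2.2.1) (pvDiffWitness_generate_months.2.2.2) = pvDiffWitnessOut_generate_months.1 ∧ generate_months_alt (pvDiffWitness_generate_months.1) (pvDiffWitness_generate_months.2.1) (pvDiffWitness_generate_months.2.2.1) (pvDiffWitness_generate_months.2.2.2) = pvDiffWitnessOut_generate_months.2 ∧ pvDiffWitnessOut_generate_months.1 ≠ pvDiffWitnessOut_generate_months.2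
def Claim_exact_generate_months : Prop := ∀ (start_year : Int) (start_month : Int) (end_year : Int) (end_month : Int), Dom_generate_months start_year start_month end_year end_month → D_generate_months start_year start_month end_year end_month → generate_months start_year start_month end_year end_month ≠ generate_months_alt start_year start_month end_year end_month

-- ===== LEMMAS AND PROOFS =====

-- the first-year test never fires on the tail years, so B restarted at (y+1, 1) is the tail flatMap
lemma alt_shift (ey em y m : Int) :
    (PySem.List.pyRange (y + 1) (ey + 1) 1).flatMap (fun y' =>
      (PySem.List.pyRange (if y' = y then m else 1)
          ((if y' = ey then min em 12 else 12) + 1) 1).map (fun m' => pvFmtYM y' m')) =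
    generate_months_alt (y + 1) 1 ey em := by
  unfold generate_months_alt
  exact List.flatMap_congr (fun a ha => by
    rw [PySem.List.mem_pyRange_one] at ha
    rw [if_neg (by omega)]
    by_cases h2 : a = y + 1
    · rw [if_pos h2]
    · rw [if_neg h2])

-- peel the first year off B
lemma alt_unfold (ey em y m : Int) (hy : y ≤ ey) :
    generate_months_alt y m ey em =
      (PySem.List.pyRange m ((if y = ey then min em 12 else 12) + 1) 1).map
          (fun m' => pvFmtYM y m') ++ generate_months_alt (y + 1) 1 ey em := by
  conv_lhs => unfold generate_months_alt
  rw [PySem.List.pyRange_one_cons (by omega)]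
  simp only [List.flatMap_cons, if_pos rfl, if_true]
  rw [alt_shift ey em y m]

lemma alt_nil_of_stop (ey em y m : Int)
    (h : ¬ (y < ey ∨ (y = ey ∧ m ≤ em))) : generate_months_alt y m ey em = [] := by
  push_neg at h
  by_cases hy : y = ey
  · have hem : em < m := h.2 hy
    rw [alt_unfold ey em y m (by omega), if_pos hy,
        PySem.List.pyRange_one_eq_nil (by simp only [min_def]; split <;> omega)]
    unfold generate_months_alt
    rw [PySem.List.pyRange_one_eq_nil (by omega)]
    simp
  · unfold generate_months_alt
    rw [PySem.List.pyRange_one_eq_nil (by omega)]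
    simp

lemma alt_cons (ey em y m : Int) (hm : m ≤ 12)
    (h : y < ey ∨ (y = ey ∧ m ≤ em)) :
    generate_months_alt y m ey em =
      pvFmtYM y m ::
        (if m + 1 > 12 then generate_months_alt (y + 1) 1 ey em
         else generate_months_alt y (m + 1) ey em) := by
  have hy : y ≤ ey := by rcases h with h | h <;> omega
  have hhi : m ≤ (if y = ey then min em 12 else 12) := by
    by_cases hyE : y = ey
    · rw [if_pos hyE]; rcases h with h | h
      · omega
      · exact le_min h.2 hm
    · rw [if_neg hyE]; exact hm
  have hhi12 : (if y = ey then min em 12 else 12) ≤ 12 := by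
    split
    · exact min_le_right _ _
    · exact le_refl _
  rw [alt_unfold ey em y m hy]
  by_cases hc : m + 1 > 12
  · -- carry: m = 12 and the first year contributes exactly [pvFmtYM y 12]
    rw [if_pos hc,
        PySem.List.pyRange_one_cons (by omega),
        PySem.List.pyRange_one_eq_nil (by omega)]
    simp
  · rw [if_neg hc, alt_unfold ey em y (m + 1) hy,
        PySem.List.pyRange_one_cons (by omega)]
    simp

lemma loopA_eq_alt (n : Nat) : ∀ (ey em y m : Int) (acc : List String),
    (12 * (ey - y) + 13 - m).toNat ≤ n →
    (m ≤ 12 ∨ ¬ (y < ey ∨ (y = ey ∧ m ≤ em))) →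
    pvLoopA ey em y m acc = acc ++ generate_months_alt y m ey em := by
  induction n with
  | zero =>
    intro ey em y m acc hn hinv
    have hstop : ¬ (y < ey ∨ (y = ey ∧ m ≤ em)) := by
      rcases hinv with hm | hs
      · intro hc; rcases hc with hc | hc <;> omega
      · exact hs
    rw [pvLoopA, if_neg hstop, alt_nil_of_stop ey em y m hstop]
    simp
  | succ n ih =>
    intro ey em y m acc hn hinv
    by_cases hc : y < ey ∨ (y = ey ∧ m ≤ em)
    · have hm : m ≤ 12 := by
        rcases hinv with hm | hs
        · exact hm
        · exact absurd hc hs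
      rw [pvLoopA, if_pos hc, alt_cons ey em y m hm hc]
      by_cases hcar : m + 1 > 12
      · simp only [if_pos hcar]
        rw [ih ey em (y + 1) 1 _ (by rcases hc with h | h <;> omega) (Or.inl (by omega))]
        simp
      · simp only [if_neg hcar]
        rw [ih ey em y (m + 1) _ (by rcases hc with h | h <;> omega) (Or.inl (by omega))]
        simp
    · rw [pvLoopA, if_neg hc, alt_nil_of_stop ey em y m hc]
      simp

-- ===== VERDICT (by name: the statement is the Claim_ definition above) =====
theorem generate_months_spec : Claim_unchanged_generate_months := by
  intro sy sm ey em _ hnD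
  have hinv : sm ≤ 12 ∨ ¬ (sy < ey ∨ (sy = ey ∧ sm ≤ em)) := by
    rcases lt_or_ge 12 sm with h12 | h12
    · right; intro hc; exact hnD ⟨h12, hc⟩
    · left; exact h12
  unfold generate_months
  rw [loopA_eq_alt ((12 * (ey - sy) + 13 - sm).toNat) ey em sy sm [] le_rfl hinv]
  simp

theorem generate_months_changed : Claim_changed_generate_months := by
  unfold Claim_changed_generate_months pvDiffWitness_generate_months pvDiffWitnessOut_generate_months
  refine ⟨by decide, by decide, ?_, by decide, by decide⟩
  unfold generate_months
  rw [pvLoopA]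
  norm_num
  rw [pvLoopA]
  norm_num
  decide

theorem generate_months_tight : Claim_exact_generate_months := by
  intro sy sm ey em _ hD
  obtain ⟨h12, hc⟩ := hD
  have hAlt : generate_months_alt sy sm ey em = generate_months_alt (sy + 1) 1 ey em := by
    rw [alt_unfold ey em sy sm (by rcases hc with h | h <;> omega),
        PySem.List.pyRange_one_eq_nil (by
          by_cases hyE : sy = ey
          · rw [if_pos hyE]; simp only [min_def]; split <;> omega
          · rw [if_neg hyE]; omega)]
    simp
  unfold generate_months
  rw [pvLoopA, if_pos hc, if_pos (by omega),
      loopA_eq_alt ((12 * (ey - (sy + 1)) + 13 - 1).toNat) ey em (sy + 1) 1 _ le_rfl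
        (Or.inl (by omega)),
      hAlt]
  simp
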